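-- pv_equiv track=rewrite | github.com/PatilHiteshB/Competetive | Python/UnequalArrays/UnequalArrays.py | solve
-- ===== SOURCE A (Python) =====
-- from typing import List
--
-- def solve(N : int, A : List[int], B : List[int]) -> int:
--     # code here
--     if sum(A) != sum(B):
--         return -1
--
--     AEven, BEven = [], []
--     AOdd, BOdd = [], []
--
--     for i in range(N):
--
--         if abs(A[i])&1 == 0:
--             AEven.append(A[i])
--         else:
--             AOdd.append(A[i])
--
--         if abs(B[i])&1 == 0:
--             BEven.append(B[i])
--         else:
--             BOdd.append(B[i])
--
--     if len(AEven) != len(BEven):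
--         return -1
--
--     AEven.sort()
--     BEven.sort()
--     AOdd.sort()
--     BOdd.sort()
--
--     ans = 0
--     for i in range(len(AEven)):
--         ans += abs(AEven[i]-BEven[i])
--     for i in range(len(AOdd)):
--         ans += abs(AOdd[i]-BOdd[i])
--
--     return ans//4
-- ===== SOURCE B (Python) =====
-- def solve(N, A, B):
--     # Wasserstein/CDF sweep: one merged event list (value, +1 for A / -1 for B) sorted by
--     # (parity, value); a running balance pays |balance| * gap per step. No pairing of
--     # sorted lists, no per-class partition: the balance returns to zero at the parity
--     # boundary, so a single pass with one counter covers both classes.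
--     if sum(A) != sum(B):
--         return -1
--     n = max(N, 0)
--     pa, pb = A[:n], B[:n]
--     if sum(x % 2 for x in pa) != sum(x % 2 for x in pb):
--         return -1
--     events = sorted([(x, 1) for x in pa] + [(x, -1) for x in pb],
--                     key=lambda t: (t[0] % 2, t[0]))
--     ans, bal, prev = 0, 0, 0
--     for v, d in events:
--         ans += abs(bal) * (v - prev)
--         bal += d
--         prev = v
--     return ans // 4
-- ===== Notes on version B (the rewrite author's own statement) =====
-- stated objective: alternative
-- what changed: Replaces A's four even/odd partition lists, four sorts and two index-paired summation loops by a CDF (Wasserstein) sweep: one merged event list ((x,+1) from A, (x,-1) from B) sorted by (parity, value), traversed once while a running balance counter pays |balance|*gap per step; no pairing of elements ever happens.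
import Mathlib
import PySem

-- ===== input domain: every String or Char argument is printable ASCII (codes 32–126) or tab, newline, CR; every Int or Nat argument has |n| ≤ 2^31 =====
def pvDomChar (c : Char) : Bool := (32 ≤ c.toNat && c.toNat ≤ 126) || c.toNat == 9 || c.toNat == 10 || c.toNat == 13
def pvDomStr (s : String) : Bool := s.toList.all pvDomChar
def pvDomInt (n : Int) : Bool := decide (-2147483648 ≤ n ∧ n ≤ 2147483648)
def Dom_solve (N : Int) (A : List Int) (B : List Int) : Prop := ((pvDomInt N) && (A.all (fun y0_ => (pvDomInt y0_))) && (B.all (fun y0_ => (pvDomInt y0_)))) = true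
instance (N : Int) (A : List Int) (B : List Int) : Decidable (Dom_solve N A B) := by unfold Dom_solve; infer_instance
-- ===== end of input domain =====

-- B replaces A's four-way partition, four sorts and two index-paired summation loops by a
-- single merged event sweep (a running balance pays |balance|*gap); alternative algorithm, same cost.

-- ===== PORT A =====
-- the loop state: (AEven, AOdd, BEven, BOdd)
def solve (N : Int) (A : List Int) (B : List Int) : Int :=
  if A.sum ≠ B.sum then -1
  else
    -- for i in range(N): append A[i]/B[i] by parity of abs(·)&1
    let st := (PySem.List.pyRange 0 N 1).foldl
      (fun (s : List Int × List Int × List Int × List Int) i =>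
        let a := PySem.List.pyGetD A i 0   -- A[i]; exact here: Pre_ keeps every index in range
        let b := PySem.List.pyGetD B i 0   -- B[i]
        let s1 := if (a.natAbs &&& 1) == 0 then (s.1 ++ [a], s.2.1, s.2.2.1, s.2.2.2)
                  else (s.1, s.2.1 ++ [a], s.2.2.1, s.2.2.2)
        if (b.natAbs &&& 1) == 0 then (s1.1, s1.2.1, s1.2.2.1 ++ [b], s1.2.2.2)
        else (s1.1, s1.2.1, s1.2.2.1, s1.2.2.2 ++ [b]))
      ([], [], [], [])
    if st.1.length ≠ st.2.2.1.length then -1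
    else
      let AEs := PySem.List.sorted st.1 (fun x => x)
      let BEs := PySem.List.sorted st.2.2.1 (fun x => x)
      let AOs := PySem.List.sorted st.2.1 (fun x => x)
      let BOs := PySem.List.sorted st.2.2.2 (fun x => x)
      let ans1 := (PySem.List.pyRange 0 (AEs.length : Int) 1).foldl
        (fun acc i => acc + |PySem.List.pyGetD AEs i 0 - PySem.List.pyGetD BEs i 0|) 0
      let ans2 := (PySem.List.pyRange 0 (AOs.length : Int) 1).foldl
        (fun acc i => acc + |PySem.List.pyGetD AOs i 0 - PySem.List.pyGetD BOs i 0|) ans1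
      PySem.Int.floordiv ans2 4

-- ===== PORT B =====
def solve_alt (N : Int) (A : List Int) (B : List Int) : Int :=
  if A.sum ≠ B.sum then -1
  else
    let pa := PySem.List.slice A none (some (max N 0))   -- A[:n], n = max(N, 0)
    let pb := PySem.List.slice B none (some (max N 0))   -- B[:n]
    if (pa.map (fun x => x % 2)).sum ≠ (pb.map (fun x => x % 2)).sum then -1
    else
      -- events sorted by key (t[0] % 2, t[0])
      let events := PySem.List.sorted2
        (pa.map (fun x => (x, (1 : Int))) ++ pb.map (fun x => (x, (-1 : Int))))
        (fun t => t.1 % 2) (fun t => t.1)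
      -- state (ans, bal, prev); ans += abs(bal) * (v - prev); bal += d; prev = v
      let st := events.foldl
        (fun (s : Int × Int × Int) t => (s.1 + |s.2.1| * (t.1 - s.2.2), s.2.1 + t.2, t.1))
        (0, 0, 0)
      PySem.Int.floordiv st.1 4

-- ===== PRECONDITION & SPEC =====
-- Pre_ excludes exactly the inputs on which A raises IndexError: N exceeding a length while
-- the sums agree (with unequal sums A returns -1 before indexing anything).
def Pre_solve (N : Int) (A : List Int) (B : List Int) : Prop :=
  (N ≤ (A.length : Int) ∧ N ≤ (B.length : Int)) ∨ A.sum ≠ B.sum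
instance (N : Int) (A : List Int) (B : List Int) : Decidable (Pre_solve N A B) := by
  unfold Pre_solve; infer_instance
def pvWitness_solve : Int × List Int × List Int := (2, [1, 2], [2, 1])

def Spec_solve (N : Int) (A : List Int) (B : List Int) (out : Int) : Prop := out = solve_alt N A B
instance (N : Int) (A : List Int) (B : List Int) (out : Int) : Decidable (Spec_solve N A B out) := by unfold Spec_solve; infer_instance

-- ===== CLAIM (what is proved, stated in full; the proofs are below) =====
def Claim_equal_solve : Prop := ∀ (N : Int) (A : List Int) (B : List Int), Dom_solve N A B → Pre_solve N A B → Spec_solve N A B (solve N A B)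

-- ===== LEMMAS AND PROOFS =====

-- ---- generic helpers used only by the proofs ----

-- sum of |a-b| over positional pairs
def pairAbsSum (xs ys : List Int) : Int := ((xs.zip ys).map (fun p => |p.1 - p.2|)).sum

-- B's sweep step on state (ans, bal, prev)
def sweepF (s : Int × Int × Int) (t : Int × Int) : Int × Int × Int :=
  (s.1 + |s.2.1| * (t.1 - s.2.2), s.2.1 + t.2, t.1)

-- sorted2's comparator at B's keys (t.1 % 2, t.1)
def evtLt (t u : Int × Int) : Bool :=
  decide (t.1 % 2 < u.1 % 2) || (!decide (u.1 % 2 < t.1 % 2) && decide (t.1 < u.1))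

-- A-side comparators from the middle form
def lt2 (a b : Int) : Bool :=
  decide (a % 2 < b % 2) || (!decide (b % 2 < a % 2) && decide (a < b))
def lt1 (a b : Int) : Bool := decide (a < b)

theorem sum_mod_two (xs : List Int) :
    (xs.map (fun x => x % 2)).sum = ((xs.filter (fun x => x % 2 != 0)).length : Int) := by
  induction xs with
  | nil => simp
  | cons x t ih =>
    by_cases h : x % 2 = 0
    · simp [h, ih]
    · have h1 : x % 2 = 1 := by omega
      simp [List.filter_cons, h, h1, ih]
      ring

theorem lt2_odd (x o : Int) (hx : x % 2 ≠ 0) (ho : o % 2 ≠ 0) : lt2 x o = lt1 x o := by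
  have hx1 : x % 2 = 1 := by omega
  have ho1 : o % 2 = 1 := by omega
  simp [lt2, lt1, hx1, ho1]

theorem ins_lex (x : Int) (E O : List Int)
    (hE : ∀ e ∈ E, e % 2 = 0) (hO : ∀ o ∈ O, o % 2 ≠ 0) :
    PySem.List.insertBy lt2 x (E ++ O)
      = if x % 2 = 0 then PySem.List.insertBy lt1 x E ++ O
        else E ++ PySem.List.insertBy lt1 x O := by
  induction E with
  | nil =>
    simp only [List.nil_append]
    by_cases hx : x % 2 = 0
    · simp only [hx, if_pos rfl]
      cases O with
      | nil => simp [PySem.List.insertBy]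
      | cons o O2 =>
        have ho := hO o (by simp)
        have ho1 : o % 2 = 1 := by omega
        have : lt2 x o = true := by
          simp [lt2, hx, ho1]
        simp [PySem.List.insertBy, this]
    · simp only [if_neg hx]
      induction O with
      | nil => simp [PySem.List.insertBy]
      | cons o O2 ihO =>
        have ho := hO o (by simp)
        rw [show PySem.List.insertBy lt2 x (o :: O2) = if lt2 x o then x :: o :: O2 else o :: PySem.List.insertBy lt2 x O2 from by simp [PySem.List.insertBy]]
        rw [show PySem.List.insertBy lt1 x (o :: O2) = if lt1 x o then x :: o :: O2 else o :: PySem.List.insertBy lt1 x O2 from by simp [PySem.List.insertBy]]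
        rw [lt2_odd x o hx ho]
        split
        · rfl
        · rw [ihO (fun o ho2 => hO o (by simp [ho2]))]
  | cons e E2 ihE =>
    have he := hE e (by simp)
    rw [List.cons_append]
    rw [show ∀ (l : List Int), PySem.List.insertBy lt2 x (e :: l) = if lt2 x e then x :: e :: l else e :: PySem.List.insertBy lt2 x l from fun l => by simp [PySem.List.insertBy]]
    by_cases hx : x % 2 = 0
    · have : lt2 x e = lt1 x e := by simp [lt2, lt1, hx, he]
      rw [this]
      rw [show PySem.List.insertBy lt1 x (e :: E2) = if lt1 x e then x :: e :: E2 else e :: PySem.List.insertBy lt1 x E2 from by simp [PySem.List.insertBy]]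
      simp only [hx, if_pos rfl] at *
      split
      · simp
      · rw [ihE (fun a ha => hE a (by simp [ha]))]
        simp [hx]
    · have : lt2 x e = false := by simp [lt2]; omega
      rw [this]
      simp only [if_neg hx, Bool.false_eq_true, if_false] at *
      rw [ihE (fun a ha => hE a (by simp [ha]))]
      simp [hx]

theorem fold_lex (xs : List Int) (E O : List Int)
    (hE : ∀ e ∈ E, e % 2 = 0) (hO : ∀ o ∈ O, o % 2 ≠ 0) :
    xs.foldl (fun acc x => PySem.List.insertBy lt2 x acc) (E ++ O)
      = (xs.filter (fun x => x % 2 == 0)).foldl (fun acc x => PySem.List.insertBy lt1 x acc) E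
        ++ (xs.filter (fun x => x % 2 != 0)).foldl (fun acc x => PySem.List.insertBy lt1 x acc) O := by
  induction xs generalizing E O with
  | nil => simp
  | cons x t ih =>
    simp only [List.foldl_cons, List.filter_cons]
    rw [ins_lex x E O hE hO]
    by_cases hx : x % 2 = 0
    · have hxb : (x % 2 == 0) = true := by simp [hx]
      have hxb2 : (x % 2 != 0) = false := by simp [hx]
      rw [if_pos hx, hxb, hxb2]
      rw [ih _ _ (fun e he => by rcases (PySem.List.mem_insertBy lt1 x e E).1 he with h | h
                                 · exact h ▸ hx
                                 · exact hE e h) hO]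
      simp
    · have hxb : (x % 2 == 0) = false := by simp [hx]
      have hxb2 : (x % 2 != 0) = true := by simp [hx]
      rw [if_neg hx, hxb, hxb2]
      rw [ih _ _ hE (fun o ho => by rcases (PySem.List.mem_insertBy lt1 x o O).1 ho with h | h
                                    · exact h ▸ hx
                                    · exact hO o h)]
      simp [hxb, hxb2]

theorem sorted2_split (xs : List Int) :
    PySem.List.sorted2 xs (fun x => x % 2) (fun x => x)
      = PySem.List.sorted (xs.filter (fun x => x % 2 == 0)) (fun x => x)
        ++ PySem.List.sorted (xs.filter (fun x => x % 2 != 0)) (fun x => x) := by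
  rw [PySem.List.sorted_eq_foldl_insertBy, PySem.List.sorted_eq_foldl_insertBy]
  have h := fold_lex xs [] [] (by simp) (by simp)
  simp only [List.append_nil] at h
  rw [show PySem.List.sorted2 xs (fun x => x % 2) (fun x => x)
        = xs.foldl (fun acc x => PySem.List.insertBy lt2 x acc) [] from rfl]
  rw [h]; rfl

theorem pyRange_succ (n : Nat) :
    PySem.List.pyRange 0 ((n : Int) + 1) 1 = PySem.List.pyRange 0 (n : Int) 1 ++ [(n : Int)] := by
  rw [PySem.List.pyRange_one_append 0 (n : Int) ((n : Int) + 1) (by positivity) (by omega)]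
  congr 1
  rw [PySem.List.pyRange_one_cons (by omega)]
  simp [PySem.List.pyRange_one]

theorem sum_idx_aux (xs ys : List Int) (n : Nat) (hx : n ≤ xs.length) (hy : n ≤ ys.length) (c : Int) :
    (PySem.List.pyRange 0 (n : Int) 1).foldl
      (fun acc i => acc + |PySem.List.pyGetD xs i 0 - PySem.List.pyGetD ys i 0|) c
    = ((xs.take n).zip (ys.take n)).foldl (fun acc p => acc + |p.1 - p.2|) c := by
  induction n with
  | zero => simp [PySem.List.pyRange_one]
  | succ n ih =>
    have hxn : n < xs.length := by omega
    have hyn : n < ys.length := by omega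
    rw [show ((n + 1 : Nat) : Int) = (n : Int) + 1 by push_cast; ring]
    rw [pyRange_succ, List.foldl_append, ih (by omega) (by omega)]
    rw [List.take_succ, List.take_succ]
    rw [List.getElem?_eq_getElem hxn, List.getElem?_eq_getElem hyn]
    rw [List.zip_append (by simp [List.length_take]; omega), List.foldl_append]
    simp [PySem.List.pyGetD_natCast, List.getD, List.getElem?_eq_getElem, hxn, hyn]

theorem sum_idx (xs ys : List Int) (h : xs.length = ys.length) (c : Int) :
    (PySem.List.pyRange 0 (xs.length : Int) 1).foldl
      (fun acc i => acc + |PySem.List.pyGetD xs i 0 - PySem.List.pyGetD ys i 0|) c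
    = (xs.zip ys).foldl (fun acc p => acc + |p.1 - p.2|) c := by
  rw [sum_idx_aux xs ys xs.length (le_refl _) (by omega) c]
  rw [List.take_length, h, List.take_length]

theorem pev_eq (x : Int) : ((x.natAbs &&& 1) == 0) = (x % 2 == 0) := by
  simp only [Nat.and_one_is_mod]
  rw [Bool.eq_iff_iff]; simp only [beq_iff_eq]; omega

theorem partition_loop (A B : List Int) (n : Nat) (hA : n ≤ A.length) (hB : n ≤ B.length) :
    (PySem.List.pyRange 0 (n : Int) 1).foldl
      (fun (s : List Int × List Int × List Int × List Int) i =>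
        let a := PySem.List.pyGetD A i 0
        let b := PySem.List.pyGetD B i 0
        let s1 := if (a.natAbs &&& 1) == 0 then (s.1 ++ [a], s.2.1, s.2.2.1, s.2.2.2)
                  else (s.1, s.2.1 ++ [a], s.2.2.1, s.2.2.2)
        if (b.natAbs &&& 1) == 0 then (s1.1, s1.2.1, s1.2.2.1 ++ [b], s1.2.2.2)
        else (s1.1, s1.2.1, s1.2.2.1, s1.2.2.2 ++ [b]))
      ([], [], [], [])
    = ((A.take n).filter (fun x => x % 2 == 0), (A.take n).filter (fun x => x % 2 != 0),
       (B.take n).filter (fun x => x % 2 == 0), (B.take n).filter (fun x => x % 2 != 0)) := by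
  induction n with
  | zero => simp [PySem.List.pyRange_one]
  | succ n ih =>
    have hAn : n < A.length := by omega
    have hBn : n < B.length := by omega
    rw [show ((n + 1 : Nat) : Int) = (n : Int) + 1 by push_cast; ring]
    rw [pyRange_succ, List.foldl_append, ih (by omega) (by omega)]
    rw [List.take_succ, List.take_succ, List.getElem?_eq_getElem hAn, List.getElem?_eq_getElem hBn]
    simp only [List.foldl_cons, List.foldl_nil, PySem.List.pyGetD_natCast, List.getD,
      List.getElem?_eq_getElem, hAn, hBn, Option.getD_some, Option.toList_some, pev_eq,
      List.filter_append, List.filter_cons, List.filter_nil]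
    by_cases ha : A[n] % 2 = 0 <;> by_cases hb : B[n] % 2 = 0 <;>
      simp [ha, hb]

theorem filt_len (xs : List Int) :
    (xs.filter (fun x => x % 2 == 0)).length + (xs.filter (fun x => x % 2 != 0)).length
      = xs.length := by
  induction xs with
  | nil => rfl
  | cons x t ih =>
    by_cases h : x % 2 = 0 <;> simp [List.filter_cons, h] <;> omega

theorem main_test (A B : List Int) (n : Nat)
    (hA : n ≤ A.length) (hB : n ≤ B.length) :
    (if A.sum ≠ B.sum then (-1 : Int)
     else
       let st := (PySem.List.pyRange 0 (n : Int) 1).foldl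
         (fun (s : List Int × List Int × List Int × List Int) i =>
           let a := PySem.List.pyGetD A i 0
           let b := PySem.List.pyGetD B i 0
           let s1 := if (a.natAbs &&& 1) == 0 then (s.1 ++ [a], s.2.1, s.2.2.1, s.2.2.2)
                     else (s.1, s.2.1 ++ [a], s.2.2.1, s.2.2.2)
           if (b.natAbs &&& 1) == 0 then (s1.1, s1.2.1, s1.2.2.1 ++ [b], s1.2.2.2)
           else (s1.1, s1.2.1, s1.2.2.1, s1.2.2.2 ++ [b]))
         ([], [], [], [])
       if st.1.length ≠ st.2.2.1.length then -1
       else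
         let AEs := PySem.List.sorted st.1 (fun x => x)
         let BEs := PySem.List.sorted st.2.2.1 (fun x => x)
         let AOs := PySem.List.sorted st.2.1 (fun x => x)
         let BOs := PySem.List.sorted st.2.2.2 (fun x => x)
         let ans1 := (PySem.List.pyRange 0 (AEs.length : Int) 1).foldl
           (fun acc i => acc + |PySem.List.pyGetD AEs i 0 - PySem.List.pyGetD BEs i 0|) 0
         let ans2 := (PySem.List.pyRange 0 (AOs.length : Int) 1).foldl
           (fun acc i => acc + |PySem.List.pyGetD AOs i 0 - PySem.List.pyGetD BOs i 0|) ans1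
         PySem.Int.floordiv ans2 4)
    = (if A.sum ≠ B.sum then (-1 : Int)
       else if ((A.take n).map (fun x => x % 2)).sum ≠ ((B.take n).map (fun x => x % 2)).sum then -1
       else
         let sa := PySem.List.sorted2 (A.take n) (fun x => x % 2) (fun x => x)
         let sb := PySem.List.sorted2 (B.take n) (fun x => x % 2) (fun x => x)
         PySem.Int.floordiv ((sa.zip sb).foldl (fun acc p => acc + |p.1 - p.2|) 0) 4) := by
  by_cases hs : A.sum ≠ B.sum
  · rw [if_pos hs, if_pos hs]
  · rw [if_neg hs, if_neg hs]
    rw [partition_loop A B n hA hB]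
    dsimp only
    have hta : (A.take n).length = n := by simp [List.length_take]; omega
    have htb : (B.take n).length = n := by simp [List.length_take]; omega
    have hfa := filt_len (A.take n)
    have hfb := filt_len (B.take n)
    rw [hta] at hfa; rw [htb] at hfb
    have hguard : (((A.take n).filter (fun x => x % 2 == 0)).length ≠ ((B.take n).filter (fun x => x % 2 == 0)).length)
        ↔ (((A.take n).map (fun x => x % 2)).sum ≠ ((B.take n).map (fun x => x % 2)).sum) := by
      rw [sum_mod_two, sum_mod_two]
      omega
    by_cases hg : ((A.take n).filter (fun x => x % 2 == 0)).length ≠ ((B.take n).filter (fun x => x % 2 == 0)).length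
    · rw [if_pos hg, if_pos (hguard.1 hg)]
    · rw [if_neg hg, if_neg (fun h => hg (hguard.2 h))]
      have he : ((A.take n).filter (fun x => x % 2 == 0)).length = ((B.take n).filter (fun x => x % 2 == 0)).length := by
        omega
      have ho : ((A.take n).filter (fun x => x % 2 != 0)).length = ((B.take n).filter (fun x => x % 2 != 0)).length := by
        omega
      rw [sum_idx _ _ (by rw [PySem.List.length_sorted, PySem.List.length_sorted]; exact ho)]
      rw [sum_idx _ _ (by rw [PySem.List.length_sorted, PySem.List.length_sorted]; exact he)]
      rw [sorted2_split (A.take n), sorted2_split (B.take n)]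
      rw [List.zip_append (by rw [PySem.List.length_sorted, PySem.List.length_sorted]; exact he)]
      rw [List.foldl_append]

-- ---- B side: the sweep theorem ----

theorem pairAbsSum_cons (x y : Int) (xs ys : List Int) :
    pairAbsSum (x :: xs) (y :: ys) = |x - y| + pairAbsSum xs ys := by
  simp [pairAbsSum]

theorem pairAbsSum_append (xs ys as bs : List Int) (h : xs.length = ys.length) :
    pairAbsSum (xs ++ as) (ys ++ bs) = pairAbsSum xs ys + pairAbsSum as bs := by
  simp [pairAbsSum, List.zip_append h]

-- shifting k left-phantoms from p up to q pays k*(q-p) when all right partners are ≥ q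
theorem shift_left (k : Nat) (p q : Int) (xs ys : List Int)
    (hpq : p ≤ q) (hy : ∀ y ∈ ys, q ≤ y) (hk : k ≤ ys.length) :
    pairAbsSum (List.replicate k p ++ xs) ys
      = (k : Int) * (q - p) + pairAbsSum (List.replicate k q ++ xs) ys := by
  induction k generalizing ys with
  | zero => simp
  | succ k ih =>
    cases ys with
    | nil => simp at hk
    | cons y t =>
      have hyq : q ≤ y := hy y (by simp)
      rw [List.replicate_succ, List.replicate_succ, List.cons_append, List.cons_append,
        pairAbsSum_cons, pairAbsSum_cons,
        ih t (fun z hz => hy z (by simp [hz])) (by simpa using hk)]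
      have h1 : |p - y| = y - p := by rw [abs_sub_comm]; rw [abs_of_nonneg (by omega)]
      have h2 : |q - y| = y - q := by rw [abs_sub_comm]; rw [abs_of_nonneg (by omega)]
      rw [h1, h2]; push_cast; ring

theorem shift_right (k : Nat) (p q : Int) (xs ys : List Int)
    (hpq : p ≤ q) (hx : ∀ x ∈ xs, q ≤ x) (hk : k ≤ xs.length) :
    pairAbsSum xs (List.replicate k p ++ ys)
      = (k : Int) * (q - p) + pairAbsSum xs (List.replicate k q ++ ys) := by
  induction k generalizing xs with
  | zero => simp
  | succ k ih =>
    cases xs with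
    | nil => simp at hk
    | cons x t =>
      have hxq : q ≤ x := hx x (by simp)
      rw [List.replicate_succ, List.replicate_succ, List.cons_append, List.cons_append,
        pairAbsSum_cons, pairAbsSum_cons,
        ih t (fun z hz => hx z (by simp [hz])) (by simpa using hk)]
      have h1 : |x - p| = x - p := abs_of_nonneg (by omega)
      have h2 : |x - q| = x - q := abs_of_nonneg (by omega)
      rw [h1, h2]; push_cast; ring

-- the sweep computes the sorted-pairing transport cost, with |bal| phantoms at prev
theorem sweep_pairs (ev : List (Int × Int)) : ∀ (ans c prev : Int),
    ev.Pairwise (fun t u => t.1 ≤ u.1) →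
    (∀ t ∈ ev, t.2 = 1 ∨ t.2 = -1) →
    c + ((ev.filter (fun t => t.2 == 1)).length : Int)
      = ((ev.filter (fun t => t.2 == -1)).length : Int) →
    (c ≠ 0 → ∀ t ∈ ev, prev ≤ t.1) →
    (ev.foldl sweepF (ans, c, prev)).1
      = ans + pairAbsSum
          (List.replicate c.toNat prev ++ (ev.filter (fun t => t.2 == 1)).map (·.1))
          (List.replicate (-c).toNat prev ++ (ev.filter (fun t => t.2 == -1)).map (·.1)) := by
  induction ev with
  | nil =>
    intro ans c prev _ _ hlen _
    have hc : c = 0 := by simpa using hlen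
    simp [hc, pairAbsSum]
  | cons t tl ih =>
    rintro ans c prev hpw hd hlen hprev
    obtain ⟨v, d⟩ := t
    rcases List.pairwise_cons.1 hpw with ⟨hv, hpwtl⟩
    have hdtl : ∀ u ∈ tl, u.2 = 1 ∨ u.2 = -1 := fun u hu => hd u (by simp [hu])
    have hvtl : ∀ u ∈ tl, v ≤ u.1 := fun u hu => hv u hu
    set Atl := (tl.filter (fun t => t.2 == 1)).map (·.1) with hAtl
    set Btl := (tl.filter (fun t => t.2 == -1)).map (·.1) with hBtl
    have hAmem : ∀ x ∈ Atl, v ≤ x := by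
      intro x hx
      rcases List.mem_map.1 (hAtl ▸ hx) with ⟨u, hu, rfl⟩
      exact hvtl u (List.mem_filter.1 hu).1
    have hBmem : ∀ y ∈ Btl, v ≤ y := by
      intro y hy
      rcases List.mem_map.1 (hBtl ▸ hy) with ⟨u, hu, rfl⟩
      exact hvtl u (List.mem_filter.1 hu).1
    have hAlen : Atl.length = (tl.filter (fun t => t.2 == 1)).length := by simp [hAtl]
    have hBlen : Btl.length = (tl.filter (fun t => t.2 == -1)).length := by simp [hBtl]
    rcases hd (v, d) (by simp) with rfl | rfl
    · -- d = 1
      have hf1 : ((v, (1:Int)) :: tl).filter (fun t => t.2 == 1)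
          = (v, 1) :: tl.filter (fun t => t.2 == 1) := by simp [List.filter_cons]
      have hf2 : ((v, (1:Int)) :: tl).filter (fun t => t.2 == -1)
          = tl.filter (fun t => t.2 == -1) := by simp [List.filter_cons]
      rw [hf1, hf2] at hlen ⊢
      simp only [List.length_cons] at hlen
      have hlen' : c + ((tl.filter (fun t => t.2 == 1)).length : Int) + 1
          = ((tl.filter (fun t => t.2 == -1)).length : Int) := by push_cast at hlen ⊢; omega
      rw [List.foldl_cons,
        show sweepF (ans, c, prev) (v, 1) = (ans + |c| * (v - prev), c + 1, v) from rfl,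
        ih _ (c+1) v hpwtl hdtl (by omega) (fun _ u hu => hvtl u hu)]
      rw [List.map_cons]
      by_cases hc0 : c = 0
      · subst hc0
        simp only [show ((0:Int)+1).toNat = 1 from rfl, show (-((0:Int)+1)).toNat = 0 from rfl,
          Int.toNat_zero, neg_zero, List.replicate_zero, List.replicate_one, List.nil_append,
          List.singleton_append, abs_zero, zero_mul, add_zero]
        rfl
      rcases lt_or_gt_of_ne hc0 with hcneg | hcpos
      · -- c < 0
        have hk : (-c).toNat - 1 ≤ Atl.length := by omega
        have hrep : List.replicate (-c).toNat prev
            = prev :: List.replicate ((-c).toNat - 1) prev := by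
          rw [← List.replicate_succ]; congr 1; omega
        have hprevv : prev ≤ v := hprev hc0 (v, 1) (by simp)
        rw [show (c+1).toNat = 0 by omega, show (-(c+1)).toNat = (-c).toNat - 1 by omega,
          show c.toNat = 0 by omega]
        simp only [List.replicate_zero, List.nil_append]
        rw [hrep, List.cons_append, pairAbsSum_cons,
          shift_right ((-c).toNat - 1) prev v Atl Btl hprevv hAmem hk]
        have h1 : |v - prev| = v - prev := abs_of_nonneg (by omega)
        have h2 : |c| = -c := abs_of_neg hcneg
        have h3 : (((-c).toNat - 1 : Nat) : Int) = -c - 1 := by omega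
        rw [h1, h2, h3]; ring
      · -- c > 0
        have hk : c.toNat ≤ Btl.length := by omega
        have hprevv : prev ≤ v := hprev hc0 (v, 1) (by simp)
        rw [show (c+1).toNat = c.toNat + 1 by omega, show (-(c+1)).toNat = 0 by omega,
          show (-c).toNat = 0 by omega]
        simp only [List.replicate_zero, List.nil_append]
        rw [List.replicate_succ', List.append_assoc, List.singleton_append,
          shift_left c.toNat prev v (v :: Atl) Btl hprevv hBmem hk]
        have h2 : |c| = c := abs_of_pos hcpos
        have h3 : ((c.toNat : Nat) : Int) = c := by omega
        rw [h2, h3]; ring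
    · -- d = -1
      have hf1 : ((v, (-1:Int)) :: tl).filter (fun t => t.2 == 1)
          = tl.filter (fun t => t.2 == 1) := by simp [List.filter_cons]
      have hf2 : ((v, (-1:Int)) :: tl).filter (fun t => t.2 == -1)
          = (v, -1) :: tl.filter (fun t => t.2 == -1) := by simp [List.filter_cons]
      rw [hf1, hf2] at hlen ⊢
      simp only [List.length_cons] at hlen
      have hlen' : c + ((tl.filter (fun t => t.2 == 1)).length : Int)
          = ((tl.filter (fun t => t.2 == -1)).length : Int) + 1 := by push_cast at hlen ⊢; omega
      rw [List.foldl_cons,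
        show sweepF (ans, c, prev) (v, -1) = (ans + |c| * (v - prev), c - 1, v) from by
          simp [sweepF]; ring,
        ih _ (c-1) v hpwtl hdtl (by omega) (fun _ u hu => hvtl u hu)]
      rw [List.map_cons]
      by_cases hc0 : c = 0
      · subst hc0
        simp only [show ((0:Int)-1).toNat = 0 from rfl, show (-((0:Int)-1)).toNat = 1 from rfl,
          Int.toNat_zero, neg_zero, List.replicate_zero, List.replicate_one, List.nil_append,
          List.singleton_append, abs_zero, zero_mul, add_zero]
        rfl
      rcases lt_or_gt_of_ne hc0 with hcneg | hcpos
      · -- c < 0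
        have hk : (-c).toNat ≤ Atl.length := by omega
        have hprevv : prev ≤ v := hprev hc0 (v, -1) (by simp)
        rw [show (c-1).toNat = 0 by omega, show (-(c-1)).toNat = (-c).toNat + 1 by omega,
          show c.toNat = 0 by omega]
        simp only [List.replicate_zero, List.nil_append]
        rw [List.replicate_succ', List.append_assoc, List.singleton_append,
          shift_right (-c).toNat prev v Atl (v :: Btl) hprevv hAmem hk]
        have h2 : |c| = -c := abs_of_neg hcneg
        have h3 : (((-c).toNat : Nat) : Int) = -c := by omega
        rw [h2, h3]; ring
      · -- c > 0
        have hk : c.toNat - 1 ≤ Btl.length := by omega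
        have hrep : List.replicate c.toNat prev
            = prev :: List.replicate (c.toNat - 1) prev := by
          rw [← List.replicate_succ]; congr 1; omega
        have hprevv : prev ≤ v := hprev hc0 (v, -1) (by simp)
        rw [show (c-1).toNat = c.toNat - 1 by omega, show (-(c-1)).toNat = 0 by omega,
          show (-c).toNat = 0 by omega]
        simp only [List.replicate_zero, List.nil_append]
        rw [hrep, List.cons_append, pairAbsSum_cons,
          shift_left (c.toNat - 1) prev v Atl Btl hprevv hBmem hk]
        have h1 : |prev - v| = v - prev := by rw [abs_sub_comm]; exact abs_of_nonneg (by omega)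
        have h2 : |c| = c := abs_of_pos hcpos
        have h3 : ((c.toNat - 1 : Nat) : Int) = c - 1 := by omega
        rw [h1, h2, h3]; ring

theorem sweep_bal (ev : List (Int × Int)) : ∀ (s : Int × Int × Int),
    (ev.foldl sweepF s).2.1 = s.2.1 + (ev.map (·.2)).sum := by
  induction ev with
  | nil => intro s; simp
  | cons t tl ih => intro s; rw [List.foldl_cons, ih]; simp [sweepF]; ring

theorem dsum_counts (ev : List (Int × Int)) (h : ∀ t ∈ ev, t.2 = 1 ∨ t.2 = -1) :
    (ev.map (·.2)).sum
      = ((ev.filter (fun t => t.2 == 1)).length : Int)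
        - ((ev.filter (fun t => t.2 == -1)).length : Int) := by
  induction ev with
  | nil => simp
  | cons t tl ih =>
    rcases h t (by simp) with h1 | h1 <;>
      simp [List.filter_cons, h1, ih (fun u hu => h u (by simp [hu]))] <;> ring

-- sorted2 at B's keys is the insertBy fold with comparator evtLt
theorem sorted2_eq_fold (xs : List (Int × Int)) :
    PySem.List.sorted2 xs (fun t => t.1 % 2) (fun t => t.1)
      = xs.foldl (fun acc x => PySem.List.insertBy evtLt x acc) [] := rfl

theorem evtLt_asymm (a b : Int × Int) : evtLt a b = true → evtLt b a = false := by
  simp [evtLt]; omega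

theorem evtR_trans (a b c : Int × Int) :
    evtLt b a = false → evtLt c b = false → evtLt c a = false := by
  simp [evtLt]; omega

theorem insertBy_pairwise (x : Int × Int) (l : List (Int × Int))
    (h : l.Pairwise (fun t u => evtLt u t = false)) :
    (PySem.List.insertBy evtLt x l).Pairwise (fun t u => evtLt u t = false) := by
  induction l with
  | nil => simp [PySem.List.insertBy]
  | cons y ys ih =>
    rw [show PySem.List.insertBy evtLt x (y :: ys)
          = if evtLt x y then x :: y :: ys else y :: PySem.List.insertBy evtLt x ys from by
        simp [PySem.List.insertBy]]
    rcases List.pairwise_cons.1 h with ⟨hy, hys⟩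
    by_cases hxy : evtLt x y = true
    · rw [if_pos hxy]
      refine List.pairwise_cons.2 ⟨?_, h⟩
      intro z hz
      rcases List.mem_cons.1 hz with rfl | hz2
      · exact evtLt_asymm x z hxy
      · exact evtR_trans x y z (evtLt_asymm x y hxy) (hy z hz2)
    · rw [if_neg hxy]
      refine List.pairwise_cons.2 ⟨?_, ih hys⟩
      intro z hz
      rcases (PySem.List.mem_insertBy evtLt x z ys).1 hz with rfl | hz2
      · simpa using hxy
      · exact hy z hz2

theorem fold_pairwise (xs : List (Int × Int)) : ∀ (acc : List (Int × Int)),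
    acc.Pairwise (fun t u => evtLt u t = false) →
    (xs.foldl (fun acc x => PySem.List.insertBy evtLt x acc) acc).Pairwise
      (fun t u => evtLt u t = false) := by
  induction xs with
  | nil => intro acc h; exact h
  | cons x t ih => intro acc h; exact ih _ (insertBy_pairwise x acc h)

theorem events_pairwise (xs : List (Int × Int)) :
    (PySem.List.sorted2 xs (fun t => t.1 % 2) (fun t => t.1)).Pairwise
      (fun t u => evtLt u t = false) := by
  rw [sorted2_eq_fold]; exact fold_pairwise xs [] (by simp)

-- a key-sorted event list is its even events followed by its odd events
theorem even_prefix (l : List (Int × Int))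
    (h : l.Pairwise (fun t u => evtLt u t = false)) :
    l = l.filter (fun t => t.1 % 2 == 0) ++ l.filter (fun t => t.1 % 2 != 0) := by
  induction l with
  | nil => rfl
  | cons t tl ih =>
    rcases List.pairwise_cons.1 h with ⟨ht, htl⟩
    by_cases hp : t.1 % 2 = 0
    · have h1 : (t.1 % 2 == 0) = true := by simp [hp]
      have h2 : (t.1 % 2 != 0) = false := by simp [hp]
      rw [List.filter_cons, List.filter_cons, h1, h2]
      simp only [if_pos, Bool.false_eq_true, if_false, if_true]
      rw [List.cons_append]
      exact congrArg _ (ih htl)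
    · have hall : ∀ u ∈ t :: tl, u.1 % 2 ≠ 0 := by
        intro u hu
        rcases List.mem_cons.1 hu with rfl | hu2
        · exact hp
        · have := ht u hu2
          simp [evtLt] at this
          omega
      rw [List.filter_eq_nil_iff.2 (fun u hu => by simp [hall u hu]), List.nil_append,
        (List.filter_eq_self).2 (fun u hu => by simp [hall u hu])]

theorem vals_eq (l : List (Int × Int)) (xs : List Int)
    (hperm : (l.map (fun t => t.1)).Perm xs)
    (hpw : (l.map (fun t => t.1)).Pairwise (· ≤ ·)) :
    l.map (fun t => t.1) = PySem.List.sorted xs (fun x => x) :=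
  PySem.List.eq_of_perm_of_pairwise_le_of_injective (fun x => x) (fun _ _ h => h)
    (hperm.trans (PySem.List.sorted_perm xs (fun x => x) false).symm) hpw
    (PySem.List.sorted_pairwise xs (fun x => x))

theorem zipfold_eq (xs ys : List Int) :
    (xs.zip ys).foldl (fun acc p => acc + |p.1 - p.2|) 0 = pairAbsSum xs ys := by
  rw [PySem.List.foldl_add]; simp [pairAbsSum]

theorem middle_to_sweep (pa pb : List Int)
    (hlen : pa.length = pb.length)
    (hsum : (pa.map (fun x => x % 2)).sum = (pb.map (fun x => x % 2)).sum) :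
    ((PySem.List.sorted2 pa (fun x => x % 2) (fun x => x)).zip
        (PySem.List.sorted2 pb (fun x => x % 2) (fun x => x))).foldl
      (fun acc p => acc + |p.1 - p.2|) 0
    = ((PySem.List.sorted2
          (pa.map (fun x => (x, (1 : Int))) ++ pb.map (fun x => (x, (-1 : Int))))
          (fun t => t.1 % 2) (fun t => t.1)).foldl
        (fun (s : Int × Int × Int) t => (s.1 + |s.2.1| * (t.1 - s.2.2), s.2.1 + t.2, t.1))
        (0, 0, 0)).1 := by
  set evlist := pa.map (fun x => (x, (1 : Int))) ++ pb.map (fun x => (x, (-1 : Int))) with hev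
  set ev := PySem.List.sorted2 evlist (fun t => t.1 % 2) (fun t => t.1) with hevs
  have hperm : ev.Perm evlist := PySem.List.sorted2_perm evlist _ _ false
  have hpw : ev.Pairwise (fun t u => evtLt u t = false) := events_pairwise evlist
  set E := ev.filter (fun t => t.1 % 2 == 0) with hE
  set O := ev.filter (fun t => t.1 % 2 != 0) with hO
  have hEO : ev = E ++ O := even_prefix ev hpw
  have hEmem : ∀ t ∈ E, t.1 % 2 = 0 := fun t ht => by
    have := (List.mem_filter.1 (hE ▸ ht)).2; simpa using this
  have hOmem : ∀ t ∈ O, t.1 % 2 = 1 := fun t ht => by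
    have := (List.mem_filter.1 (hO ▸ ht)).2; simp at this; omega
  have hdev : ∀ t ∈ ev, t.2 = 1 ∨ t.2 = -1 := by
    intro t ht
    have h2 := hperm.mem_iff.1 ht
    rw [hev] at h2
    rcases List.mem_append.1 h2 with h | h
    · rcases List.mem_map.1 h with ⟨x, _, rfl⟩; left; rfl
    · rcases List.mem_map.1 h with ⟨x, _, rfl⟩; right; rfl
  have hdE : ∀ t ∈ E, t.2 = 1 ∨ t.2 = -1 := fun t ht => hdev t (List.mem_of_mem_filter (hE ▸ ht))
  have hdO : ∀ t ∈ O, t.2 = 1 ∨ t.2 = -1 := fun t ht => hdev t (List.mem_of_mem_filter (hO ▸ ht))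
  -- value-sortedness within each parity class
  have hpwE : E.Pairwise (fun t u => t.1 ≤ u.1) := by
    refine (hpw.filter (fun t => t.1 % 2 == 0)).imp_of_mem ?_
    intro a b ha hb hr
    have h1 := hEmem a ha; have h2 := hEmem b hb
    simp [evtLt] at hr; omega
  have hpwO : O.Pairwise (fun t u => t.1 ≤ u.1) := by
    refine (hpw.filter (fun t => t.1 % 2 != 0)).imp_of_mem ?_
    intro a b ha hb hr
    have h1 := hOmem a ha; have h2 := hOmem b hb
    simp [evtLt] at hr; omega
  -- identify each class's a-values/b-values with the sorted filtered source lists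
  -- even class, a side
  have hpermEa : ((E.filter (fun t => t.2 == 1)).map (fun t => t.1)).Perm
      (pa.filter (fun x => x % 2 == 0)) := by
    have h := (hperm.filter (fun a => a.2 == 1 && a.1 % 2 == 0)).map (fun t => t.1)
    rw [hev] at h
    rw [hE, List.filter_filter]
    simpa [List.filter_append, List.filter_map, Function.comp_def, List.map_map] using h
  have hpermEb : ((E.filter (fun t => t.2 == -1)).map (fun t => t.1)).Perm
      (pb.filter (fun x => x % 2 == 0)) := by
    have h := (hperm.filter (fun a => a.2 == -1 && a.1 % 2 == 0)).map (fun t => t.1)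
    rw [hev] at h
    rw [hE, List.filter_filter]
    simpa [List.filter_append, List.filter_map, Function.comp_def, List.map_map] using h
  have hpermOa : ((O.filter (fun t => t.2 == 1)).map (fun t => t.1)).Perm
      (pa.filter (fun x => x % 2 != 0)) := by
    have h := (hperm.filter (fun a => a.2 == 1 && a.1 % 2 != 0)).map (fun t => t.1)
    rw [hev] at h
    rw [hO, List.filter_filter]
    simpa [List.filter_append, List.filter_map, Function.comp_def, List.map_map] using h
  have hpermOb : ((O.filter (fun t => t.2 == -1)).map (fun t => t.1)).Perm
      (pb.filter (fun x => x % 2 != 0)) := by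
    have h := (hperm.filter (fun a => a.2 == -1 && a.1 % 2 != 0)).map (fun t => t.1)
    rw [hev] at h
    rw [hO, List.filter_filter]
    simpa [List.filter_append, List.filter_map, Function.comp_def, List.map_map] using h
  have hvalpw : ∀ (l : List (Int × Int)) (q : Int × Int → Bool),
      l.Pairwise (fun t u => t.1 ≤ u.1) →
      ((l.filter q).map (fun t => t.1)).Pairwise (· ≤ ·) :=
    fun l q h => List.pairwise_map.2 (h.filter q)
  have hEa := vals_eq _ _ hpermEa (hvalpw E _ hpwE)
  have hEb := vals_eq _ _ hpermEb (hvalpw E _ hpwE)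
  have hOa := vals_eq _ _ hpermOa (hvalpw O _ hpwO)
  have hOb := vals_eq _ _ hpermOb (hvalpw O _ hpwO)
  -- counts agree per class
  have hcntE : (pa.filter (fun x => x % 2 == 0)).length
      = (pb.filter (fun x => x % 2 == 0)).length := by
    have h1 := sum_mod_two pa; have h2 := sum_mod_two pb
    have h3 := filt_len pa; have h4 := filt_len pb
    omega
  have hcntO : (pa.filter (fun x => x % 2 != 0)).length
      = (pb.filter (fun x => x % 2 != 0)).length := by
    have h1 := sum_mod_two pa; have h2 := sum_mod_two pb
    omega
  have hlenE : (0 : Int) + ((E.filter (fun t => t.2 == 1)).length : Int)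
      = ((E.filter (fun t => t.2 == -1)).length : Int) := by
    have h1 : (E.filter (fun t => t.2 == 1)).length = (pa.filter (fun x => x % 2 == 0)).length := by
      have := hpermEa.length_eq; simpa using this
    have h2 : (E.filter (fun t => t.2 == -1)).length = (pb.filter (fun x => x % 2 == 0)).length := by
      have := hpermEb.length_eq; simpa using this
    omega
  have hlenO : (0 : Int) + ((O.filter (fun t => t.2 == 1)).length : Int)
      = ((O.filter (fun t => t.2 == -1)).length : Int) := by
    have h1 : (O.filter (fun t => t.2 == 1)).length = (pa.filter (fun x => x % 2 != 0)).length := by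
      have := hpermOa.length_eq; simpa using this
    have h2 : (O.filter (fun t => t.2 == -1)).length = (pb.filter (fun x => x % 2 != 0)).length := by
      have := hpermOb.length_eq; simpa using this
    omega
  -- sweep over E from the initial state
  have hstE := sweep_pairs E 0 0 0 hpwE hdE hlenE (fun h => absurd rfl h)
  simp only [Int.toNat_zero, neg_zero, List.replicate_zero, List.nil_append, zero_add] at hstE
  have hbalE : (E.foldl sweepF (0, 0, 0)).2.1 = 0 := by
    rw [sweep_bal, dsum_counts E hdE]
    have e0 : ((0, 0, 0) : Int × Int × Int).2.1 = 0 := rfl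
    rw [e0]
    have h1 : (E.filter (fun t => t.2 == 1)).length = (pa.filter (fun x => x % 2 == 0)).length := by
      have := hpermEa.length_eq; simpa using this
    have h2 : (E.filter (fun t => t.2 == -1)).length = (pb.filter (fun x => x % 2 == 0)).length := by
      have := hpermEb.length_eq; simpa using this
    omega
  -- sweep over O from the state left by E
  have hstO := sweep_pairs O ((E.foldl sweepF (0, 0, 0)).1) 0
      ((E.foldl sweepF (0, 0, 0)).2.2) hpwO hdO hlenO (fun h => absurd rfl h)
  simp only [Int.toNat_zero, neg_zero, List.replicate_zero, List.nil_append, zero_add] at hstO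
  have hst : E.foldl sweepF (0, 0, 0)
      = ((E.foldl sweepF (0, 0, 0)).1, 0, (E.foldl sweepF (0, 0, 0)).2.2) := by
    conv_lhs => rw [show E.foldl sweepF (0, 0, 0)
        = ((E.foldl sweepF (0, 0, 0)).1, (E.foldl sweepF (0, 0, 0)).2.1,
           (E.foldl sweepF (0, 0, 0)).2.2) from rfl]
    rw [hbalE]
  -- assemble
  rw [show (fun (s : Int × Int × Int) t => (s.1 + |s.2.1| * (t.1 - s.2.2), s.2.1 + t.2, t.1))
        = sweepF from rfl]
  rw [hEO, List.foldl_append, hst, hstO]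
  rw [sorted2_split pa, sorted2_split pb, zipfold_eq]
  rw [show pairAbsSum (PySem.List.sorted (pa.filter (fun x => x % 2 == 0)) (fun x => x)
          ++ PySem.List.sorted (pa.filter (fun x => x % 2 != 0)) (fun x => x))
        (PySem.List.sorted (pb.filter (fun x => x % 2 == 0)) (fun x => x)
          ++ PySem.List.sorted (pb.filter (fun x => x % 2 != 0)) (fun x => x))
      = pairAbsSum (PySem.List.sorted (pa.filter (fun x => x % 2 == 0)) (fun x => x))
          (PySem.List.sorted (pb.filter (fun x => x % 2 == 0)) (fun x => x))
        + pairAbsSum (PySem.List.sorted (pa.filter (fun x => x % 2 != 0)) (fun x => x))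
          (PySem.List.sorted (pb.filter (fun x => x % 2 != 0)) (fun x => x)) from
    pairAbsSum_append _ _ _ _ (by rw [PySem.List.length_sorted, PySem.List.length_sorted]; exact hcntE)]
  rw [hstE, ← hEa, ← hEb, ← hOa, ← hOb]

-- ===== VERDICT (by name: the statement is the Claim_ definition above) =====
theorem solve_spec : Claim_equal_solve := by
  intro N A B _ hPre
  by_cases hs : A.sum ≠ B.sum
  · show solve N A B = solve_alt N A B
    unfold solve solve_alt
    rw [if_pos hs, if_pos hs]
  · obtain ⟨hA, hB⟩ := hPre.resolve_right (fun h => hs h)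
    have h1 : PySem.List.pyRange 0 N 1 = PySem.List.pyRange 0 ((N.toNat : Nat) : Int) 1 := by
      have he : (N - 0).toNat = (((N.toNat : Nat) : Int) - 0).toNat := by omega
      rw [PySem.List.pyRange_one, PySem.List.pyRange_one, he]
    have hmax : max N 0 = ((N.toNat : Nat) : Int) := by
      rcases le_or_gt N 0 with h | h
      · rw [max_eq_right h]; omega
      · rw [max_eq_left (le_of_lt h)]; omega
    have h2 : PySem.List.slice A none (some (max N 0)) = A.take N.toNat := by
      rw [hmax, PySem.List.slice_to_natCast]
    have h3 : PySem.List.slice B none (some (max N 0)) = B.take N.toNat := by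
      rw [hmax, PySem.List.slice_to_natCast]
    show solve N A B = solve_alt N A B
    unfold solve solve_alt
    rw [h1, h2, h3]
    rw [main_test A B N.toNat (by omega) (by omega)]
    by_cases hg : ((A.take N.toNat).map (fun x => x % 2)).sum ≠ ((B.take N.toNat).map (fun x => x % 2)).sum
    · rw [if_neg hs, if_neg hs, if_pos hg, if_pos hg]
    · rw [if_neg hs, if_neg hs, if_neg hg, if_neg hg]
      have hlen : (A.take N.toNat).length = (B.take N.toNat).length := by
        simp [List.length_take]; omega
      have hsum2 : ((A.take N.toNat).map (fun x => x % 2)).sum = ((B.take N.toNat).map (fun x => x % 2)).sum := by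
        by_contra hc; exact hg hc
      have := middle_to_sweep (A.take N.toNat) (B.take N.toNat) hlen hsum2
      dsimp only
      rw [this]
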